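-- pv_equiv track=rewrite | github.com/manuflorenca/Curso-em-Video-Python | atividades_facul/teste.py | soma_imp
-- ===== SOURCE A (Python) =====
-- def soma_imp(n):
--     soma = 0
--     if n < 0:
--         n = n * -1
--
--     while n != 0:
--         resto = n % 10
--         if resto % 2 != 0:
--             soma = soma + resto
--         n = n // 10
--     return soma
-- ===== SOURCE B (Python) =====
-- def soma_imp(n):
--     return sum(d for c in str(abs(n)) if (d := int(c)) % 2 != 0)
-- ===== Notes on version B (the rewrite author's own statement) =====
-- stated objective: idiomatic
-- what changed: B sums the odd digits by iterating over the characters of str(abs(n)) in one generator expression instead of A's while-loop extracting digits with modulus and floor-division arithmetic.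
import Mathlib
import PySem

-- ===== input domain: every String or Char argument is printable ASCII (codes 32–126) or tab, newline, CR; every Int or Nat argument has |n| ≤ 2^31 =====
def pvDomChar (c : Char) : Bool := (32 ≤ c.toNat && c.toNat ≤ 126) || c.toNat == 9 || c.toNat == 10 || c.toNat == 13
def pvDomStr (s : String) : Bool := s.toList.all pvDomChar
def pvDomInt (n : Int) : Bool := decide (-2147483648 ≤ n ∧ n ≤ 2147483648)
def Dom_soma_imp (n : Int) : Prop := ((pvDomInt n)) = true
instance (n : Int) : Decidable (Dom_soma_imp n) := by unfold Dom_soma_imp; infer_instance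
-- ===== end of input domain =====

-- B iterates over the characters of str(abs(n)) instead of A's modulus/floor-division arithmetic loop (idiomatic rewrite).

-- ===== PORT A =====
-- A's while-loop runs only after n has been made non-negative, so it is carried out on a Nat
-- (for m ≥ 0, Python's m % 10 and m // 10 coincide with Nat.mod / Nat.div; exact here).
def somaLoopA (m : Nat) (soma : Int) : Int :=
  if h : m = 0 then soma
  else
    let resto : Nat := m % 10
    somaLoopA (m / 10) (if (resto : Int) % 2 ≠ 0 then soma + (resto : Int) else soma)
termination_by m
decreasing_by exact Nat.div_lt_self (Nat.pos_of_ne_zero h) (by norm_num)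

def soma_imp (n : Int) : Int :=
  somaLoopA (if n < 0 then n * -1 else n).toNat 0

-- ===== PORT B =====
-- int(c) for a single decimal digit character produced by str(...): exact on those chars.
def digitVal (c : Char) : Int := (c.toNat : Int) - 48

def soma_imp_alt (n : Int) : Int :=
  (PySem.Int.toStr |n|).toList.foldl
    (fun acc c => let d := digitVal c; if d % 2 ≠ 0 then acc + d else acc) 0

-- ===== PRECONDITION & SPEC =====
def Spec_soma_imp (n : Int) (out : Int) : Prop := out = soma_imp_alt n
instance (n : Int) (out : Int) : Decidable (Spec_soma_imp n out) := by unfold Spec_soma_imp; infer_instance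

-- ===== CLAIM (what is proved, stated in full; the proofs are below) =====
def Claim_equal_soma_imp : Prop := ∀ (n : Int), Dom_soma_imp n → Spec_soma_imp n (soma_imp n)

-- ===== LEMMAS AND PROOFS =====

def stepB (acc : Int) (c : Char) : Int :=
  let d := digitVal c; if d % 2 ≠ 0 then acc + d else acc

lemma somaLoopA_shift (m : Nat) (soma : Int) : somaLoopA m soma = soma + somaLoopA m 0 := by
  induction m using Nat.strong_induction_on generalizing soma with
  | _ m ih =>
    by_cases h : m = 0
    · simp [somaLoopA, h]
    · have hlt : m / 10 < m := Nat.div_lt_self (Nat.pos_of_ne_zero h) (by norm_num)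
      rw [somaLoopA]; conv_rhs => rw [somaLoopA]
      simp only [h, dif_neg, not_false_iff]
      rw [ih _ hlt]; conv_rhs => rw [ih _ hlt]
      split_ifs <;> ring

lemma somaLoopA_step (n : Nat) (h : n ≠ 0) :
    somaLoopA n 0 = (if ((n % 10 : Nat) : Int) % 2 ≠ 0 then ((n % 10 : Nat) : Int) else 0)
      + somaLoopA (n / 10) 0 := by
  rw [somaLoopA]
  simp only [h, dif_neg, not_false_iff]
  rw [somaLoopA_shift]
  split_ifs <;> ring

lemma foldl_stepB_shift (l : List Char) (acc : Int) :
    l.foldl stepB acc = acc + l.foldl stepB 0 := by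
  induction l generalizing acc with
  | nil => simp
  | cons c t ih =>
    simp only [List.foldl_cons]
    rw [ih, ih (acc := stepB 0 c)]
    simp [stepB]; split_ifs <;> ring

lemma digitVal_digitChar (d : Nat) (hd : d < 10) : digitVal (Nat.digitChar d) = (d : Int) := by
  interval_cases d <;> decide

lemma toDigitsCore_fold (fuel : Nat) :
    ∀ (n : Nat) (ds : List Char), n < fuel →
      (Nat.toDigitsCore 10 fuel n ds).foldl stepB 0 = somaLoopA n 0 + ds.foldl stepB 0 := by
  induction fuel with
  | zero => intro n ds h; omega
  | succ f ih =>
    intro n ds h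
    rw [Nat.toDigitsCore]
    by_cases h0 : n / 10 = 0
    · have hn : n < 10 := Nat.lt_of_div_eq_zero (by norm_num) h0
      have hm : n % 10 = n := Nat.mod_eq_of_lt hn
      rw [if_pos h0, List.foldl_cons, foldl_stepB_shift]
      by_cases hz : n = 0
      · subst hz
        have hs : stepB 0 (Nat.digitChar (0 % 10)) = 0 := by decide
        rw [hs]
        simp [somaLoopA]
      · rw [somaLoopA_step n hz, h0]
        have hd : stepB 0 (Nat.digitChar (n % 10)) =
            (if ((n % 10 : Nat) : Int) % 2 ≠ 0 then ((n % 10 : Nat) : Int) else 0) := by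
          simp only [stepB, digitVal_digitChar _ (Nat.mod_lt _ (by norm_num))]
          split_ifs <;> ring
        rw [hd]
        simp [somaLoopA]
    · rw [if_neg h0]
      have hlt : n / 10 < f := by
        have : n / 10 < n := Nat.div_lt_self (by omega) (by norm_num)
        omega
      have hn0 : n ≠ 0 := by intro hz; subst hz; simp at h0
      rw [ih _ _ hlt, List.foldl_cons, foldl_stepB_shift, somaLoopA_step n hn0]
      have hd : stepB 0 (Nat.digitChar (n % 10)) =
          (if ((n % 10 : Nat) : Int) % 2 ≠ 0 then ((n % 10 : Nat) : Int) else 0) := by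
        simp only [stepB, digitVal_digitChar _ (Nat.mod_lt _ (by norm_num))]
        split_ifs <;> ring
      rw [hd]; ring

lemma toChars_fold (m : Nat) :
    (PySem.Int.toChars (m : Int)).foldl stepB 0 = somaLoopA m 0 := by
  have : ¬ ((m : Int) < 0) := by omega
  simp only [PySem.Int.toChars, this, if_neg, not_false_iff, Int.toNat_natCast]
  rw [Nat.toDigits, toDigitsCore_fold (m + 1) m [] (Nat.lt_succ_self m)]
  simp

-- ===== VERDICT (by name: the statement is the Claim_ definition above) =====
theorem soma_imp_spec : Claim_equal_soma_imp := by
  intro n _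
  show soma_imp n = soma_imp_alt n
  unfold soma_imp soma_imp_alt
  have habs : |n| = ((n.natAbs : Nat) : Int) := by
    rw [Int.abs_eq_natAbs]
  have htn : (if n < 0 then n * -1 else n).toNat = n.natAbs := by
    split_ifs with h <;> omega
  rw [htn, habs, PySem.Int.toList_toStr]
  exact (toChars_fold n.natAbs).symm
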